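-- pv_equiv track=rewrite | github.com/jihkang/Sisyphus | src/sisyphus/promotion_state.py | _is_non_promotable_path
-- ===== SOURCE A (Python) =====
-- NON_PROMOTABLE_PATH_PREFIXES = (
--     ".planning/",
--     "tests/",
--     "test/",
-- )
--
-- def _is_non_promotable_path(path: str) -> bool:
--     normalized = _normalize_repo_path(path)
--     if normalized is None:
--         return False
--     return any(
--         normalized == prefix.rstrip("/") or normalized.startswith(prefix)
--         for prefix in NON_PROMOTABLE_PATH_PREFIXES
--     )
--
-- def _normalize_text_value(value: object | None) -> str | None:
--     if value is None:
--         return None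
--     normalized = str(value).strip()
--     return normalized or None
--
-- def _normalize_repo_path(value: object | None) -> str | None:
--     normalized = _normalize_text_value(value)
--     if normalized is None:
--         return None
--     return normalized.replace("\\", "/").lstrip("./")
-- ===== SOURCE B (Python) =====
-- def _is_non_promotable_path(path: str) -> bool:
--     head = str(path).strip().replace("\\", "/").lstrip("./").split("/", 1)[0]
--     return head in (".planning", "tests", "test")
-- ===== Notes on version B (the rewrite author's own statement) =====
-- stated objective: simpler
-- what changed: B drops the None-propagating helper decomposition and the per-prefix equality-or-startswith loop: one normalization pipeline, split off the first path segment, one membership test against the three segment names (the empty string naturally gives False).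
import Mathlib
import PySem

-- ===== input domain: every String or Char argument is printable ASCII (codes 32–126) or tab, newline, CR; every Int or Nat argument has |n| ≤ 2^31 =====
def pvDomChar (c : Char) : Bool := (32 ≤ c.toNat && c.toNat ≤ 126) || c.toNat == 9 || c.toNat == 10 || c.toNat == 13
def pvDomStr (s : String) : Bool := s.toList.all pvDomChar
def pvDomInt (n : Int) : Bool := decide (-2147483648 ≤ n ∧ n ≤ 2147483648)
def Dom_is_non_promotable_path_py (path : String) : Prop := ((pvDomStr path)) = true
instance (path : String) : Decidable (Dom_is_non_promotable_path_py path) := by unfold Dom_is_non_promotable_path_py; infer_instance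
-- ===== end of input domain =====

-- B drops A's Option-propagating helper decomposition and its per-prefix
-- equality-or-startswith loop: one normalization pipeline, take the first path
-- segment, one membership test against the three segment names (objective: simpler).

-- ===== PORT A =====
-- hand ports of str.lstrip(chars)/str.rstrip(chars) (PySem has only the no-argument forms);
-- exact: drop from the left/right every character occurring in chars
def pyLstripChars (s chars : List Char) : List Char := s.dropWhile (chars.contains ·)
def pyRstripChars (s chars : List Char) : List Char :=
  (s.reverse.dropWhile (chars.contains ·)).reverse

def NON_PROMOTABLE_PATH_PREFIXES : List String := [".planning/", "tests/", "test/"]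

-- _normalize_text_value on a str argument (str(value) is the identity there)
def normalize_text_value (value : String) : Option String :=
  let normalized := PySem.Str.strip value
  if normalized = "" then none else some normalized

def normalize_repo_path (value : String) : Option String :=
  match normalize_text_value value with
  | none => none
  | some normalized =>
      some (String.ofList (pyLstripChars (PySem.Str.replace normalized "\\" "/").toList ['.', '/']))

def is_non_promotable_path_py (path : String) : Bool :=
  match normalize_repo_path path with
  | none => false
  | some normalized =>
      NON_PROMOTABLE_PATH_PREFIXES.any fun prefix_ =>
        normalized == String.ofList (pyRstripChars prefix_.toList ['/'])
          || PySem.Str.startswith normalized prefix_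

-- ===== PORT B =====
-- one pipeline over List Char: strip, replace '\' -> '/', drop leading '.'/'/' chars
-- (lstrip("./")), take the chars before the first '/' (split("/",1)[0]), then a
-- three-way membership test; no Option, no loop over prefixes
def is_non_promotable_path_py_alt (path : String) : Bool :=
  let head :=
    (((PySem.Str.replace (PySem.Str.strip path) "\\" "/").toList.dropWhile
        (fun c => c == '.' || c == '/')).takeWhile (fun c => !(c == '/')))
  head == ".planning".toList || head == "tests".toList || head == "test".toList

-- ===== PRECONDITION & SPEC =====
def Spec_is_non_promotable_path_py (path : String) (out : Bool) : Prop := out = is_non_promotable_path_py_alt path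
instance (path : String) (out : Bool) : Decidable (Spec_is_non_promotable_path_py path out) := by unfold Spec_is_non_promotable_path_py; infer_instance

-- ===== CLAIM (what is proved, stated in full; the proofs are below) =====
def Claim_equal_is_non_promotable_path_py : Prop := ∀ (path : String), Dom_is_non_promotable_path_py path → Spec_is_non_promotable_path_py path (is_non_promotable_path_py path)

-- ===== LEMMAS AND PROOFS =====

-- the first segment equals x (with '/' ∉ x) iff the string is x or starts with x ++ "/"
theorem takeWhile_eq_iff (s x : List Char) (hx : '/' ∉ x) :
    s.takeWhile (· ≠ '/') = x ↔ (s = x ∨ (x ++ ['/']) <+: s) := by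
  induction x generalizing s with
  | nil =>
    cases s with
    | nil => simp
    | cons c t =>
      rw [List.takeWhile_cons]
      by_cases hc : c = '/'
      · subst hc; simp [List.cons_prefix_cons]
      · simp [hc, List.cons_prefix_cons]
        exact fun h => hc h.symm
  | cons a xa ih =>
    have ha : a ≠ '/' := by intro h; exact hx (h ▸ List.mem_cons_self ..)
    have hxa : '/' ∉ xa := fun h => hx (List.mem_cons_of_mem _ h)
    cases s with
    | nil => simp
    | cons c t =>
      rw [List.takeWhile_cons]
      by_cases hc : c = '/'
      · subst hc
        simp [List.cons_prefix_cons, ha, ha.symm]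
      · by_cases hca : c = a
        · subst hca
          have ih' := ih t hxa
          simp only [ne_eq, decide_not] at ih'
          simp [hc, List.cons_prefix_cons, ih']
        · simp [hc, List.cons_prefix_cons, hca, (Ne.symm hca : a ≠ c)]

-- B's two Bool predicates agree with A's helper's '∈ chars' forms
theorem dropWhile_pred_eq (l : List Char) :
    l.dropWhile (fun c => c == '.' || c == '/') = pyLstripChars l ['.', '/'] := by
  unfold pyLstripChars
  congr 1
  funext c
  by_cases h1 : c = '.' <;> by_cases h2 : c = '/' <;> simp [h1, h2]

theorem takeWhile_pred_eq (l : List Char) :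
    l.takeWhile (fun c => !(c == '/')) = l.takeWhile (· ≠ '/') := by
  congr 1
  funext c
  by_cases h : c = '/' <;> simp [h]

-- ===== VERDICT (by name: the statement is the Claim_ definition above) =====
theorem is_non_promotable_path_py_spec : Claim_equal_is_non_promotable_path_py := by
  intro path _
  unfold Spec_is_non_promotable_path_py is_non_promotable_path_py is_non_promotable_path_py_alt
  unfold normalize_repo_path normalize_text_value
  by_cases hs : PySem.Str.strip path = ""
  · simp [hs, PySem.Str.replace]
    decide
  · simp only [hs, ite_false]
    set l := (PySem.Str.replace (PySem.Str.strip path) "\\" "/").toList with hl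
    rw [dropWhile_pred_eq, takeWhile_pred_eq]
    set m := pyLstripChars l ['.', '/'] with hm
    simp only [NON_PROMOTABLE_PATH_PREFIXES, List.any_cons, List.any_nil, Bool.or_false]
    have p1 : pyRstripChars ".planning/".toList ['/'] = ".planning".toList := by decide
    have p2 : pyRstripChars "tests/".toList ['/'] = "tests".toList := by decide
    have p3 : pyRstripChars "test/".toList ['/'] = "test".toList := by decide
    have q1 : ".planning".toList ++ ['/'] = ".planning/".toList := by decide
    have q2 : "tests".toList ++ ['/'] = "tests/".toList := by decide
    have q3 : "test".toList ++ ['/'] = "test/".toList := by decide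
    rw [Bool.eq_iff_iff]
    simp only [Bool.or_eq_true, beq_iff_eq, String.ofList_inj,
      PySem.Str.startswith_eq, String.toList_ofList, PySem.Chars.startswith_iff,
      p1, p2, p3,
      takeWhile_eq_iff _ ".planning".toList (by decide),
      takeWhile_eq_iff _ "tests".toList (by decide),
      takeWhile_eq_iff _ "test".toList (by decide),
      q1, q2, q3]
    exact or_assoc.symm
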